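-- pv_equiv track=rewrite | github.com/Niicoo/scorelisto-python-lib | lib/scorelisto/tools.py | extract_peak_indexes
-- ===== SOURCE A (Python) =====
-- def extract_peak_indexes(signal):
--     peak_indexes = []
--     StatutNoteAV = "DOWN"
--     kStart = None
--     for k in range(1, len(signal)):
--         if(signal[k] > signal[k - 1]):
--             StatutNoteAP = "UP"
--         elif(signal[k] == signal[k - 1]):
--             StatutNoteAP = "CONST"
--         else:
--             StatutNoteAP = "DOWN"
--
--         if((StatutNoteAV=="UP") and (StatutNoteAP=="DOWN")):
--             peak_indexes.append(k - 1)
--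
--         if((StatutNoteAV=="UP") and (StatutNoteAP=="CONST")):
--             kStart = k - 1
--
--         if((StatutNoteAV=="CONST") and (StatutNoteAP=="UP")):
--             kStart = None
--
--         if((StatutNoteAV=="CONST") and (StatutNoteAP=="DOWN") and (kStart != None)):
--             peak_indexes.append(int(round(((kStart + k - 1) / 2.0))))
--
--         StatutNoteAV = StatutNoteAP
--
--     return(peak_indexes)
-- ===== SOURCE B (Python) =====
-- def extract_peak_indexes(sig):
--     # 1) adjacent-difference signs: 1=UP, 0=CONST, -1=DOWN (sign k covers sig[k-1] -> sig[k])
--     signs = [(1 if y > x else (0 if y == x else -1)) for x, y in zip(sig, sig[1:])]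
--     # 2) collapse into runs (sign, first_k, last_k), k being 1-based diff indexes
--     runs = []
--     i = 0
--     while i < len(signs):
--         s = signs[i]
--         m = 0
--         while i + 1 + m < len(signs) and signs[i + 1 + m] == s:
--             m += 1
--         runs.append((s, i + 1, i + 1 + m))
--         i += m + 1
--     # 3) walk adjacent run pairs, keeping the start of the last plateau entered from UP
--     peaks = []
--     saved = None
--     for j in range(len(runs) - 1):
--         c, _, b = runs[j]
--         c2 = runs[j + 1][0]
--         if c == 1 and c2 == -1:
--             peaks.append(b)
--         elif c == 1 and c2 == 0:
--             saved = b
--         elif c == 0 and c2 == 1: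
--             saved = None
--         elif c == 0 and c2 == -1 and saved is not None:
--             peaks.append(int(round((saved + b) / 2.0)))
--     return peaks
-- ===== Notes on version B (the rewrite author's own statement) =====
-- stated objective: alternative
-- what changed: Replaced the per-sample string state machine by a three-stage pipeline: compute the adjacent-difference sign sequence, collapse it into runs, then walk adjacent run pairs emitting the UP/DOWN boundary or the rounded plateau midpoint.
import Mathlib
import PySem

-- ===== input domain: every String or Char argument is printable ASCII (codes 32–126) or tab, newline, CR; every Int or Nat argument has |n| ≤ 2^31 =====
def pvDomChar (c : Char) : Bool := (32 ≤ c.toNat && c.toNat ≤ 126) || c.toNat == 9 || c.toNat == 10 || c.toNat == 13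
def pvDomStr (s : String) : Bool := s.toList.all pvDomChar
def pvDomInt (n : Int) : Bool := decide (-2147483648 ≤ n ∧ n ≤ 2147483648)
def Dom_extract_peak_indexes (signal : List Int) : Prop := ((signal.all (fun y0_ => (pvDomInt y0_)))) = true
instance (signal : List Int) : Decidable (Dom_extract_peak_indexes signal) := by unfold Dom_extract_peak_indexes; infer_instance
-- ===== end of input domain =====

-- B re-implements A as a three-stage pipeline (signs → runs → pair walk) instead of a per-sample
-- string state machine; same output on every input (objective: alternative, same cost).

-- ===== PORT A =====
-- exact integer value of Python's int(round(m / 2.0)) (half-to-even); exact here since the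
-- midpoint sums stay far below 2^52, so the float division is exact
def pyRoundHalfInt (m : Int) : Int :=
  let h := PySem.Int.floordiv m 2
  if PySem.Int.mod m 2 = 0 then h else if PySem.Int.mod h 2 = 0 then h else h + 1

-- loop body of A; the .getD 0 defaults are never used (k ranges over 1..len-1, both indexes in range)
def stepA (signal : List Int) (st : List Int × String × Option Int) (k : Int) :
    List Int × String × Option Int :=
  let ap := if (PySem.List.pyGet? signal k).getD 0 > (PySem.List.pyGet? signal (k - 1)).getD 0 then "UP"
    else if (PySem.List.pyGet? signal k).getD 0 = (PySem.List.pyGet? signal (k - 1)).getD 0 then "CONST"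
    else "DOWN"
  let peaks := st.1
  let av := st.2.1
  let kStart := st.2.2
  let peaks := if av = "UP" ∧ ap = "DOWN" then peaks ++ [k - 1] else peaks
  let kStart := if av = "UP" ∧ ap = "CONST" then some (k - 1) else kStart
  let kStart := if av = "CONST" ∧ ap = "UP" then none else kStart
  let peaks := if av = "CONST" ∧ ap = "DOWN" ∧ kStart ≠ none then
      peaks ++ [pyRoundHalfInt (kStart.getD 0 + k - 1)] else peaks
  (peaks, ap, kStart)

def extract_peak_indexes (signal : List Int) : List Int :=
  ((PySem.List.pyRange 1 (signal.length : Int) 1).foldl (stepA signal) ([], "DOWN", none)).1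

-- ===== PORT B =====
-- stage 1: adjacent-difference signs (1 = UP, 0 = CONST, -1 = DOWN); signal[1:] is List.drop 1
def pvSigns (signal : List Int) : List Int :=
  (signal.zip (signal.drop 1)).map (fun p => if p.2 > p.1 then 1 else if p.2 = p.1 then 0 else -1)

-- stage 2: collapse into runs (sign, first_k, last_k); the inner while-loop is the takeWhile length
def pvRuns : List Int → Int → List (Int × Int × Int)
  | [], _ => []
  | s :: rest, k =>
      let m := (rest.takeWhile (· = s)).length
      (s, k, k + m) :: pvRuns (rest.drop m) (k + m + 1)
  termination_by l _ => l.length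
  decreasing_by simp

-- stage 3: walk adjacent run pairs, keeping the start of the last plateau entered from UP;
-- int(round((saved + b) / 2.0)) is ported by pyRoundHalfInt (exact, see its comment)
def pvWalk (saved : Option Int) : List (Int × Int × Int) → List Int
  | [] => []
  | [_] => []
  | (c, _, b) :: r2 :: rest =>
      if c = 1 ∧ r2.1 = -1 then b :: pvWalk saved (r2 :: rest)
      else if c = 1 ∧ r2.1 = 0 then pvWalk (some b) (r2 :: rest)
      else if c = 0 ∧ r2.1 = 1 then pvWalk none (r2 :: rest)
      else if c = 0 ∧ r2.1 = -1 ∧ saved ≠ none then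
        pyRoundHalfInt (saved.getD 0 + b) :: pvWalk saved (r2 :: rest)
      else pvWalk saved (r2 :: rest)

def extract_peak_indexes_alt (signal : List Int) : List Int :=
  pvWalk none (pvRuns (pvSigns signal) 1)

-- ===== PRECONDITION & SPEC =====
def Spec_extract_peak_indexes (signal : List Int) (out : List Int) : Prop := out = extract_peak_indexes_alt signal
instance (signal : List Int) (out : List Int) : Decidable (Spec_extract_peak_indexes signal out) := by unfold Spec_extract_peak_indexes; infer_instance

-- ===== CLAIM (what is proved, stated in full; the proofs are below) =====
def Claim_equal_extract_peak_indexes : Prop := ∀ (signal : List Int), Dom_extract_peak_indexes signal → Spec_extract_peak_indexes signal (extract_peak_indexes signal)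

-- ===== LEMMAS AND PROOFS =====

-- A's string status as an integer sign (anything other than "UP"/"CONST" behaves like "DOWN")
def codeS (av : String) : Int := if av = "UP" then 1 else if av = "CONST" then 0 else -1

-- reference: A's state machine re-expressed structurally over the sign list, emitting forward
def goS (prev : Int) (saved : Option Int) (k : Int) : List Int → List Int
  | [] => []
  | s :: ss =>
      if prev = 1 ∧ s = -1 then (k - 1) :: goS s saved (k + 1) ss
      else if prev = 1 ∧ s = 0 then goS s (some (k - 1)) (k + 1) ss
      else if prev = 0 ∧ s = 1 then goS s none (k + 1) ss
      else if prev = 0 ∧ s = -1 ∧ saved ≠ none then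
        pyRoundHalfInt (saved.getD 0 + k - 1) :: goS s saved (k + 1) ss
      else goS s saved (k + 1) ss

theorem L_A_aux (sig : List Int) (i : ℕ) (acc : List Int) (av : String) (ks : Option Int) :
    ((PySem.List.pyRange ((i : Int) + 1) (sig.length : Int) 1).foldl (stepA sig) (acc, av, ks)).1
      = acc ++ goS (codeS av) ks ((i : Int) + 1) ((pvSigns sig).drop i) := by
  by_cases hn : i + 1 < sig.length
  case neg =>
    have h1 : PySem.List.pyRange ((i : Int) + 1) (sig.length : Int) 1 = [] :=
      PySem.List.pyRange_one_eq_nil (by omega)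
    have h2 : (pvSigns sig).drop i = [] := by
      apply List.drop_eq_nil_of_le
      simp [pvSigns]
      omega
    simp [h1, h2, goS]
  case pos =>
    have hi0 : i < sig.length := by omega
    have hcons : PySem.List.pyRange ((i : Int) + 1) (sig.length : Int) 1
        = ((i : Int) + 1) :: PySem.List.pyRange ((i : Int) + 1 + 1) (sig.length : Int) 1 :=
      PySem.List.pyRange_one_cons (by omega)
    rw [hcons, List.foldl_cons]
    have hisig : i < (pvSigns sig).length := by
      simp [pvSigns]
      omega
    have hdrop : (pvSigns sig).drop i
        = (pvSigns sig)[i]'hisig :: (pvSigns sig).drop (i + 1) := List.drop_eq_getElem_cons hisig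
    have hget : (pvSigns sig)[i]'hisig
        = (if sig[i + 1]'hn > sig[i]'hi0 then 1 else if sig[i + 1]'hn = sig[i]'hi0 then 0 else -1) := by
      simp [pvSigns]
    have e1 : PySem.List.pyGet? sig ((i : Int) + 1) = some (sig[i + 1]'hn) := by
      have h := PySem.List.pyGet?_natCast (xs := sig) (n := i + 1)
      push_cast at h
      rw [h, List.getElem?_eq_getElem hn]
    have e0 : PySem.List.pyGet? sig ((i : Int) + 1 - 1) = some (sig[i]'hi0) := by
      have harith : (i : Int) + 1 - 1 = (i : Int) := by ring
      have h := PySem.List.pyGet?_natCast (xs := sig) (n := i)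
      rw [harith, h, List.getElem?_eq_getElem hi0]
    have hidx : (i : Int) + 1 + 1 = ((i + 1 : ℕ) : Int) + 1 := by push_cast; ring
    simp only [stepA, e1, e0, Option.getD_some]
    rw [hidx, L_A_aux sig (i + 1)]
    rw [hdrop, hget]
    rcases lt_trichotomy (sig[i]'hi0) (sig[i + 1]'hn) with hc | hc | hc
    · have hne : ¬(sig[i + 1]'hn = sig[i]'hi0) := by omega
      by_cases hup : av = "UP" <;> by_cases hcv : av = "CONST" <;> by_cases hks : ks = none <;>
        simp [goS, codeS, hc, hup, hcv, hks, Nat.cast_add, Nat.cast_one]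
    · have heq : sig[i + 1]'hn = sig[i]'hi0 := by omega
      by_cases hup : av = "UP" <;> by_cases hcv : av = "CONST" <;> by_cases hks : ks = none <;>
        simp [goS, codeS, heq, hup, hcv, hks, Nat.cast_add, Nat.cast_one]
    · have hne : ¬(sig[i + 1]'hn = sig[i]'hi0) := by omega
      have hnlt : ¬(sig[i + 1]'hn > sig[i]'hi0) := by omega
      by_cases hup : av = "UP" <;> by_cases hcv : av = "CONST" <;> by_cases hks : ks = none <;>
        simp [goS, codeS, hne, hnlt, hup, hcv, hks, Nat.cast_add, Nat.cast_one]
  termination_by sig.length - i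

theorem L_rep (m : ℕ) (s : Int) (saved : Option Int) (k : Int) (ss : List Int) :
    goS s saved k (List.replicate m s ++ ss) = goS s saved (k + m) ss := by
  induction m generalizing k with
  | zero => simp
  | succ m ih =>
      rw [List.replicate_succ, List.cons_append]
      simp only [goS]
      rw [if_neg (by rintro ⟨h1, h2⟩; omega), if_neg (by rintro ⟨h1, h2⟩; omega),
          if_neg (by rintro ⟨h1, h2⟩; omega), if_neg (by rintro ⟨h1, h2, -⟩; omega)]
      rw [ih]
      congr 1
      push_cast
      ring

theorem L_ignore_a (saved : Option Int) (c a a' b : Int) (rr : List (Int × Int × Int)) :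
    pvWalk saved ((c, a, b) :: rr) = pvWalk saved ((c, a', b) :: rr) := by
  cases rr with
  | nil => rfl
  | cons r2 rest => simp only [pvWalk]

theorem pvRuns_cons (s : Int) (rest : List Int) (k : Int) :
    pvRuns (s :: rest) k
      = (s, k, k + ((rest.takeWhile (· = s)).length : Int))
          :: pvRuns (rest.drop (rest.takeWhile (· = s)).length)
               (k + (rest.takeWhile (· = s)).length + 1) := by
  rw [pvRuns]

theorem drop_takeWhile_length {α : Type} (p : α → Bool) (l : List α) :
    l.drop (l.takeWhile p).length = l.dropWhile p := by
  induction l with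
  | nil => rfl
  | cons x xs ih =>
      by_cases h : p x = true
      · simp [h, ih]
      · simp [h]

theorem takeWhile_eq_replicate (s : Int) (l : List Int) :
    l.takeWhile (· = s) = List.replicate (l.takeWhile (· = s)).length s := by
  apply List.eq_replicate_iff.mpr
  refine ⟨rfl, fun b hb => ?_⟩
  have := List.mem_takeWhile_imp hb
  simpa using this

theorem L_main (ss : List Int) (s : Int) (saved : Option Int) (k : Int) :
    goS s saved k ss = pvWalk saved ((s, k - 1, k - 1) :: pvRuns ss k) := by
  cases ss with
  | nil => rw [pvRuns]; rfl
  | cons s' ss' =>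
      rw [pvRuns_cons]
      have hsplit : List.replicate (ss'.takeWhile (· = s')).length s'
          ++ ss'.drop (ss'.takeWhile (· = s')).length = ss' := by
        conv_rhs => rw [← List.takeWhile_append_dropWhile (p := (· = s')) (l := ss')]
        rw [← takeWhile_eq_replicate, drop_takeWhile_length]
      have hrec : ∀ sv : Option Int, goS s' sv (k + 1) ss'
          = pvWalk sv ((s', k, k + ((ss'.takeWhile (· = s')).length : Int))
              :: pvRuns (ss'.drop (ss'.takeWhile (· = s')).length)
                   (k + (ss'.takeWhile (· = s')).length + 1)) := by
        intro sv
        conv_lhs => rw [← hsplit]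
        rw [L_rep]
        have h4 : k + 1 + ((ss'.takeWhile (· = s')).length : Int)
            = k + ((ss'.takeWhile (· = s')).length : Int) + 1 := by ring
        rw [h4]
        have h2 := L_main (ss'.drop (ss'.takeWhile (· = s')).length) s' sv
          (k + (ss'.takeWhile (· = s')).length + 1)
        have h3 : k + ((ss'.takeWhile (· = s')).length : Int) + 1 - 1
            = k + ((ss'.takeWhile (· = s')).length : Int) := by ring
        rw [h3] at h2
        rw [h2]
        exact L_ignore_a sv s' (k + ((ss'.takeWhile (· = s')).length : Int)) k
          (k + ((ss'.takeWhile (· = s')).length : Int)) _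
      simp only [goS, pvWalk]
      rw [show saved.getD 0 + (k - 1) = saved.getD 0 + k - 1 from by ring]
      split_ifs <;> rw [hrec]
  termination_by ss.length
  decreasing_by simp [List.length_drop]

theorem L_skip (saved : Option Int) (a b : Int) (rr : List (Int × Int × Int)) :
    pvWalk saved ((-1, a, b) :: rr) = pvWalk saved rr := by
  cases rr with
  | nil => rfl
  | cons r2 rest =>
      simp only [pvWalk]
      rw [if_neg (by rintro ⟨h, -⟩; omega), if_neg (by rintro ⟨h, -⟩; omega),
          if_neg (by rintro ⟨h, -⟩; omega), if_neg (by rintro ⟨h, -⟩; omega)]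

-- ===== VERDICT (by name: the statement is the Claim_ definition above) =====
theorem extract_peak_indexes_spec : Claim_equal_extract_peak_indexes := by
  intro sig _
  show extract_peak_indexes sig = extract_peak_indexes_alt sig
  have h0 : extract_peak_indexes sig
      = goS (codeS "DOWN") none ((0 : ℕ) + 1) ((pvSigns sig).drop 0) := by
    have := L_A_aux sig 0 [] "DOWN" none
    simpa [extract_peak_indexes] using this
  rw [h0]
  simp only [List.drop_zero, Nat.cast_zero, zero_add]
  have h1 : codeS "DOWN" = -1 := by decide
  rw [h1, L_main]
  simpa [extract_peak_indexes_alt] using L_skip none (1 - 1) (1 - 1) (pvRuns (pvSigns sig) 1)
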